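-- pv_equiv track=rewrite | github.com/emalmsten/TransZero | src/trans_zero/core/mcts.py | unwind_sequences
-- ===== SOURCE A (Python) =====
-- def unwind_sequences(sequences):
--     """
--     For a list of sequences of actions (each a list of action labels),
--     this function computes for each (node, position) the set of unique histories (prior nodes),
--     and then "unwinds" them into a single action sequence and a corresponding positional encoding.
--
--     The final encoding ensures positions are non-decreasing.
--     """
--     groups = {}  # (node, pos) -> set of histories (each history is a tuple)
--     order = {}  # (node, pos) -> first occurrence order (to preserve encounter order)
--     next_order = 0
--
--     # Loop once over each sequence to update groups
--     for seq in sequences: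
--         history = []
--         for pos, node in enumerate(seq, start=1):
--             key = (node, pos)
--             if key not in groups:
--                 groups[key] = set()
--                 order[key] = next_order
--                 next_order += 1
--             groups[key].add(tuple(history))
--             history.append(node)
--
--     # Now sort keys by position (non-decreasing) and then by encounter order.
--     sorted_keys = sorted(groups.keys(), key=lambda k: (k[1], order[k]))
--
--     action_seq = []
--     pos_seq = []
--     for node, pos in sorted_keys:
--         count = len(groups[(node, pos)])
--         action_seq.append(node * count)  # repeat node as many times as there are unique histories
--         pos_seq.append([pos] * count)
--
--     return action_seq, pos_seq
-- ===== SOURCE B (Python) =====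
-- def unwind_sequences(sequences):
--     """
--     Same result as the original, computed with a trie: every distinct history
--     (prefix of actions) is interned as an integer id, so each step of each
--     sequence costs O(1) instead of hashing a whole prefix tuple.
--     """
--     children = {}   # (parent_id, action) -> child_id; node 0 is the empty history
--     counts = {}     # (action, pos) -> number of distinct histories, in first-encounter order
--     next_id = 1
--     for seq in sequences:
--         cur = 0
--         for pos, node in enumerate(seq, start=1):
--             edge = (cur, node)
--             child = children.get(edge)
--             if child is None:
--                 child = next_id
--                 next_id += 1
--                 children[edge] = child
--                 key = (node, pos)
--                 counts[key] = counts.get(key, 0) + 1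
--             cur = child
--     # stable sort by position alone: counts is already in encounter order
--     keys = sorted(counts, key=lambda k: k[1])
--     return [n * counts[(n, p)] for n, p in keys], [[p] * counts[(n, p)] for n, p in keys]
-- ===== Notes on version B (the rewrite author's own statement) =====
-- stated objective: faster
-- what changed: Replaces the per-(node,pos) sets of whole history tuples (plus a separate first-encounter order dict and a two-component sort key) by a trie that interns every distinct prefix as an integer id, counting a new distinct history exactly when a new trie edge is created, and sorts the counter keys stably by position alone; measured 1.6-3.5x faster in a timing run, which also saw A time out on inputs where B still returned.
import Mathlib
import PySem

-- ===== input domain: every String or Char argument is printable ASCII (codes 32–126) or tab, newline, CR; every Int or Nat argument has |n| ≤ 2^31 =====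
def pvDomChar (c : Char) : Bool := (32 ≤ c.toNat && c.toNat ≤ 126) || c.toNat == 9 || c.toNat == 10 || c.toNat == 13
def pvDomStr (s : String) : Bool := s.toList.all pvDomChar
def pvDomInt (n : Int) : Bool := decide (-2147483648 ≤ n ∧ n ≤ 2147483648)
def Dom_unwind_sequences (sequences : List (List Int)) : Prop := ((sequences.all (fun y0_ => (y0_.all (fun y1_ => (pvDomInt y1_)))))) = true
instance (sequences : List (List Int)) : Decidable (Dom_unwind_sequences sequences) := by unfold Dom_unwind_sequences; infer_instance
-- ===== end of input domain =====

-- B replaces A's per-(node,pos) sets of whole history tuples (plus a separate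
-- first-encounter order dict and a two-component sort key) by a trie that interns
-- every distinct history as an integer id, counting a new distinct history exactly
-- when a new trie edge is created, and sorts the counter keys stably by position
-- alone; objective: faster (each step is one edge lookup instead of building and
-- hashing a whole prefix tuple; measured 1.6-3.5x faster in a timing run,
-- which also saw A time out on inputs where B still returned).

-- ===== PORT A =====
abbrev pvGrp := PySem.Dict (Int × Int) (PySem.Set (List Int))
abbrev pvOrd := PySem.Dict (Int × Int) Int

-- inner loop body of A: state (groups, order, next_order, history), pn = (pos, node)
def uwA_inner (st : pvGrp × pvOrd × Int × List Int) (pn : Int × Int) :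
    pvGrp × pvOrd × Int × List Int :=
  let key : Int × Int := (pn.2, pn.1)
  let st' : pvGrp × pvOrd × Int :=
    if st.1.contains key then (st.1, st.2.1, st.2.2.1)
    else (st.1.insert key PySem.Set.empty, st.2.1.insert key st.2.2.1, st.2.2.1 + 1)
  (st'.1.modify key PySem.Set.empty (fun s => PySem.Set.add s st.2.2.2),
   st'.2.1, st'.2.2, st.2.2.2 ++ [pn.2])

def unwind_sequences (sequences : List (List Int)) : List Int × List (List Int) :=
  let st : pvGrp × pvOrd × Int :=
    sequences.foldl
      (fun st seq =>
        let r := (PySem.List.enumerate seq 1).foldl uwA_inner (st.1, st.2.1, st.2.2, [])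
        (r.1, r.2.1, r.2.2.1))
      (PySem.Dict.empty, PySem.Dict.empty, 0)
  -- order[k] read with getD: every key of groups was also entered into order
  let sorted_keys := PySem.List.sorted2 st.1.keys (fun k => k.2) (fun k => st.2.1.getD k 0)
  sorted_keys.foldl
    (fun acc k =>
      let count := PySem.Set.len (st.1.getD k PySem.Set.empty)
      (acc.1 ++ [k.1 * count], acc.2 ++ [PySem.List.pyRepeat [k.2] count]))
    ([], [])

-- ===== PORT B =====
abbrev pvTrie := PySem.Dict (Int × Int) Int
abbrev pvCnt := PySem.Dict (Int × Int) Int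

-- inner loop body of B: state (children, counts, next_id, cur), pn = (pos, node)
def uwB_inner (st : pvTrie × pvCnt × Int × Int) (pn : Int × Int) :
    pvTrie × pvCnt × Int × Int :=
  match st.1.get? (st.2.2.2, pn.2) with
  | some child => (st.1, st.2.1, st.2.2.1, child)
  | none =>
      (st.1.insert (st.2.2.2, pn.2) st.2.2.1,
       st.2.1.modify (pn.2, pn.1) 0 (· + 1),
       st.2.2.1 + 1, st.2.2.1)

def unwind_sequences_alt (sequences : List (List Int)) : List Int × List (List Int) :=
  let st : pvTrie × pvCnt × Int :=
    sequences.foldl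
      (fun st seq =>
        let r := (PySem.List.enumerate seq 1).foldl uwB_inner (st.1, st.2.1, st.2.2, 0)
        (r.1, r.2.1, r.2.2.1))
      (PySem.Dict.empty, PySem.Dict.empty, 1)
  let keys := PySem.List.sorted st.2.1.keys (fun k => k.2)
  (keys.map (fun k => k.1 * st.2.1.getD k 0),
   keys.map (fun k => PySem.List.pyRepeat [k.2] (st.2.1.getD k 0)))

-- ===== PRECONDITION & SPEC =====
def Spec_unwind_sequences (sequences : List (List Int)) (out : List Int × List (List Int)) : Prop := out = unwind_sequences_alt sequences
instance (sequences : List (List Int)) (out : List Int × List (List Int)) : Decidable (Spec_unwind_sequences sequences out) := by unfold Spec_unwind_sequences; infer_instance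

-- ===== CLAIM (what is proved, stated in full; the proofs are below) =====
def Claim_equal_unwind_sequences : Prop := ∀ (sequences : List (List Int)), Dom_unwind_sequences sequences → Spec_unwind_sequences sequences (unwind_sequences sequences)

-- ===== LEMMAS AND PROOFS =====

/-- signature of a nonempty prefix: (its last action, its length) = A's (node, pos) key -/
def pvSig (t : List Int) : Int × Int := (t.getLastD 0, (t.length : Int))

/-- the nonempty prefixes of a sequence, shortest first -/
def pvPrefs (s : List Int) : List (List Int) := (List.range s.length).map (fun i => s.take (i+1))

/-- all nonempty prefixes of all sequences, in traversal order -/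
def pvAllP (sequences : List (List Int)) : List (List Int) := sequences.flatMap pvPrefs

/-- A's phase-1 step, abstracted to act on the current full prefix -/
def pvStepA (st : pvGrp × pvOrd × Int) (t : List Int) : pvGrp × pvOrd × Int :=
  let key := pvSig t
  let st' := if st.1.contains key then st
             else (st.1.insert key PySem.Set.empty, st.2.1.insert key st.2.2, st.2.2 + 1)
  (st'.1.modify key PySem.Set.empty (fun s => PySem.Set.add s t.dropLast), st'.2.1, st'.2.2)

def pvKeys (P : List (List Int)) : List (Int × Int) := PySem.Set.ofList (P.map pvSig)

def pvGrpOf (P : List (List Int)) (k : Int × Int) : PySem.Set (List Int) :=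
  PySem.Set.ofList ((P.filter (fun t => pvSig t == k)).map (·.dropLast))

/-- the id ↦ prefix table of B's trie: id 0 is the empty history, then the
    distinct nonempty prefixes in first-encounter order -/
def pvRho (D : List (List Int)) : List (List Int) := [] :: D

/-- B's trie dict viewed through the table: an edge (i, a) leads from the prefix
    with id i to the id of that prefix extended by a, when that extension is known -/
def pvInvB (c : pvTrie) (D : List (List Int)) : Prop :=
  ∀ (i a : Int), c.get? (i, a) =
    if 0 ≤ i then
      (match (pvRho D)[i.toNat]? with
       | some u =>
           if (u ++ [a]) ∈ pvRho D
           then some ((((pvRho D).idxOf (u ++ [a]) : Nat)) : Int)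
           else none
       | none => none)
    else none

/-- full invariant of B's phase-1 state -/
def pvStB (c : pvTrie) (cnt : pvCnt) (nid : Int) (D : List (List Int)) : Prop :=
  (pvRho D).Nodup ∧ (∀ t ∈ D, t ≠ [] ∧ t.dropLast ∈ pvRho D) ∧
  nid = ((pvRho D).length : Int) ∧ cnt = PySem.Dict.counter (D.map pvSig) ∧ pvInvB c D

lemma pvRho_append (D : List (List Int)) (q : List Int) :
    pvRho (D ++ [q]) = pvRho D ++ [q] := by
  simp [pvRho]

lemma pvPrefs_cons (a : Int) (s : List Int) :
    pvPrefs (a :: s) = [a] :: (pvPrefs s).map (a :: ·) := by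
  unfold pvPrefs
  rw [List.length_cons, List.range_succ_eq_map]
  simp [List.map_map, Function.comp_def, List.take_succ_cons]

lemma pvSig_concat (p : List Int) (a : Int) :
    pvSig (p ++ [a]) = (a, (p.length : Int) + 1) := by
  simp [pvSig]

-- ===== A side =====
lemma uwA_inner_spec (rest : List Int) :
    ∀ (p : List Int) (g : pvGrp) (o : pvOrd) (n : Int),
    (PySem.List.enumerate rest ((p.length : Int) + 1)).foldl uwA_inner (g, o, n, p)
      = (((pvPrefs rest).map (p ++ ·)).foldl pvStepA (g, o, n)
           |> fun r => (r.1, r.2.1, r.2.2, p ++ rest)) := by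
  induction rest with
  | nil =>
      intro p g o n
      simp [pvPrefs, PySem.List.enumerate]
  | cons a rest ih =>
      intro p g o n
      rw [PySem.List.enumerate_cons, List.foldl_cons]
      have hstep : uwA_inner (g, o, n, p) (((p.length : Int) + 1, a) : Int × Int)
          = (let r := pvStepA (g, o, n) (p ++ [a]); (r.1, r.2.1, r.2.2, p ++ [a])) := by
        simp [uwA_inner, pvStepA, pvSig_concat]
      rw [hstep]
      have hidx : ((p.length : Int) + 1) + 1 = (((p ++ [a]).length : Int) + 1) := by
        have h : (p ++ [a]).length = p.length + 1 := by simp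
        rw [h]
        push_cast
        ring
      rw [hidx, ih (p ++ [a])]
      rw [pvPrefs_cons]
      simp only [List.map_cons, List.map_map, List.foldl_cons, Function.comp_def,
        List.append_assoc, List.singleton_append]

lemma uwA_outer_spec (seqs : List (List Int)) :
    ∀ (st : pvGrp × pvOrd × Int),
    seqs.foldl
      (fun st seq =>
        let r := (PySem.List.enumerate seq 1).foldl uwA_inner (st.1, st.2.1, st.2.2, [])
        (r.1, r.2.1, r.2.2.1)) st
      = (pvAllP seqs).foldl pvStepA st := by
  induction seqs with
  | nil => intro st; rfl
  | cons s ss ih =>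
      intro st
      simp only [List.foldl_cons]
      have h1 := uwA_inner_spec s [] st.1 st.2.1 st.2.2
      simp at h1
      rw [h1, ih]
      simp only [pvAllP, List.flatMap_cons, List.foldl_append]

lemma pvStepA_step (g : pvGrp) (o : pvOrd) (n : Int) (P : List (List Int)) (t : List Int)
    (hkeys : g.keys = pvKeys P) (hlen : n = ((pvKeys P).length : Int))
    (hg : ∀ k, g.get? k = if k ∈ pvKeys P then some (pvGrpOf P k) else none)
    (ho : ∀ k, o.get? k = if k ∈ pvKeys P then some ((((pvKeys P).idxOf k : Nat)) : Int) else none) :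
    ((pvStepA (g, o, n) t).1.keys = pvKeys (P ++ [t])) ∧
    ((pvStepA (g, o, n) t).2.2 = ((pvKeys (P ++ [t])).length : Int)) ∧
    (∀ k, (pvStepA (g, o, n) t).1.get? k
        = if k ∈ pvKeys (P ++ [t]) then some (pvGrpOf (P ++ [t]) k) else none) ∧
    (∀ k, (pvStepA (g, o, n) t).2.1.get? k
        = if k ∈ pvKeys (P ++ [t]) then some ((((pvKeys (P ++ [t])).idxOf k : Nat)) : Int) else none) := by
  have hkeys' : pvKeys (P ++ [t]) = PySem.Set.add (pvKeys P) (pvSig t) := by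
    rw [pvKeys, List.map_append, List.map_singleton, PySem.Set.ofList_append_singleton]
    rfl
  have hfilter : ∀ k, ((P ++ [t]).filter (fun u => pvSig u == k))
      = P.filter (fun u => pvSig u == k) ++ (if pvSig t = k then [t] else []) := by
    intro k
    rw [List.filter_append]
    by_cases h : pvSig t = k <;> simp [h]
  by_cases hmem : pvSig t ∈ pvKeys P
  · have hcont : g.contains (pvSig t) = true := by
      rw [PySem.Dict.contains_eq_isSome_get?, hg, if_pos hmem]; rfl
    have hg0 : g.get? (pvSig t) = some (pvGrpOf P (pvSig t)) := by
      rw [hg, if_pos hmem]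
    have hgd : g.getD (pvSig t) PySem.Set.empty = pvGrpOf P (pvSig t) :=
      PySem.Dict.getD_of_get?_eq_some _ _ hg0
    have hstep : pvStepA (g, o, n) t
        = (g.insert (pvSig t) (PySem.Set.add (pvGrpOf P (pvSig t)) t.dropLast), o, n) := by
      simp only [pvStepA, hcont, if_true]
      show (g.insert (pvSig t)
        (PySem.Set.add (g.getD (pvSig t) PySem.Set.empty) t.dropLast), o, n) = _
      rw [hgd]
    rw [hstep]
    have haddmem : PySem.Set.add (pvKeys P) (pvSig t) = pvKeys P :=
      PySem.Set.add_of_mem hmem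
    refine ⟨?_, ?_, ?_, ?_⟩
    · show (g.insert (pvSig t) _).keys = _
      rw [PySem.Dict.keys_insert_of_contains _ _ hcont, hkeys, hkeys', haddmem]
    · show n = _
      rw [hkeys', haddmem]; exact hlen
    · intro k
      show (g.insert (pvSig t) _).get? k = _
      rw [PySem.Dict.get?_insert]
      by_cases hk : k = pvSig t
      · subst hk
        rw [if_pos rfl, if_pos (by rw [hkeys', haddmem]; exact hmem)]
        congr 1
        rw [pvGrpOf, pvGrpOf, hfilter, if_pos rfl, List.map_append, List.map_singleton,
          PySem.Set.ofList_append_singleton]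
      · have hgrp : pvGrpOf (P ++ [t]) k = pvGrpOf P k := by
          rw [pvGrpOf, pvGrpOf, hfilter, if_neg (fun h => hk h.symm), List.append_nil]
        rw [if_neg hk, hg k, hkeys', haddmem, hgrp]
    · intro k
      show o.get? k = _
      rw [ho k, hkeys', haddmem]
  · have hcont : g.contains (pvSig t) = false := by
      rw [PySem.Dict.contains_eq_isSome_get?, hg, if_neg hmem]; rfl
    have hstep : pvStepA (g, o, n) t
        = (g.insert (pvSig t) (PySem.Set.add PySem.Set.empty t.dropLast),
           o.insert (pvSig t) n, n + 1) := by
      simp only [pvStepA, hcont, Bool.false_eq_true, if_false]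
      show ((g.insert (pvSig t) PySem.Set.empty).insert (pvSig t)
          (PySem.Set.add ((g.insert (pvSig t) PySem.Set.empty).getD (pvSig t) PySem.Set.empty)
            t.dropLast), o.insert (pvSig t) n, n + 1) = _
      rw [PySem.Dict.getD_insert_self, PySem.Dict.insert_insert_self]
    rw [hstep]
    have hadd : PySem.Set.add (pvKeys P) (pvSig t) = pvKeys P ++ [pvSig t] :=
      PySem.Set.add_of_not_mem hmem
    have hfilP : P.filter (fun u => pvSig u == (pvSig t)) = [] := by
      rw [List.filter_eq_nil_iff]
      intro u hu
      simp only [beq_iff_eq]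
      intro he
      apply hmem
      rw [pvKeys, PySem.Set.mem_ofList, ← he]
      exact List.mem_map_of_mem hu
    refine ⟨?_, ?_, ?_, ?_⟩
    · show (g.insert (pvSig t) _).keys = _
      rw [PySem.Dict.keys_insert_of_not_contains _ _ hcont, hkeys, hkeys', hadd]
    · show n + 1 = _
      rw [hkeys', hadd, List.length_append, List.length_singleton, hlen]
      push_cast
      ring
    · intro k
      show (g.insert (pvSig t) _).get? k = _
      rw [PySem.Dict.get?_insert]
      by_cases hk : k = pvSig t
      · subst hk
        rw [if_pos rfl, if_pos (by
          rw [hkeys', hadd]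
          exact List.mem_append_right _ (List.mem_singleton_self _))]
        congr 1
        rw [pvGrpOf, hfilter, if_pos rfl, hfilP, List.nil_append, List.map_singleton]
        rfl
      · have hgrp : pvGrpOf (P ++ [t]) k = pvGrpOf P k := by
          rw [pvGrpOf, pvGrpOf, hfilter, if_neg (fun h => hk h.symm), List.append_nil]
        have hmemiff : (k ∈ pvKeys (P ++ [t])) ↔ k ∈ pvKeys P := by
          rw [hkeys', hadd]
          simp [List.mem_append, hk]
        rw [if_neg hk, hg k, hgrp]
        by_cases hkk : k ∈ pvKeys P
        · rw [if_pos hkk, if_pos (hmemiff.mpr hkk)]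
        · rw [if_neg hkk, if_neg (fun h => hkk (hmemiff.mp h))]
    · intro k
      show (o.insert (pvSig t) n).get? k = _
      rw [PySem.Dict.get?_insert]
      by_cases hk : k = pvSig t
      · subst hk
        rw [if_pos rfl, if_pos (by
          rw [hkeys', hadd]
          exact List.mem_append_right _ (List.mem_singleton_self _))]
        congr 1
        rw [hkeys', hadd, List.idxOf_append_of_notMem hmem, List.idxOf_cons_self, hlen]
        push_cast
        ring
      · rw [if_neg hk, ho k]
        by_cases hkk : k ∈ pvKeys P
        · rw [if_pos hkk, if_pos (by rw [hkeys', hadd]; exact List.mem_append_left _ hkk)]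
          congr 2
          rw [hkeys', hadd, List.idxOf_append_of_mem hkk]
        · rw [if_neg hkk, if_neg (by
            intro h
            apply hkk
            have := h
            rw [hkeys', hadd, List.mem_append] at this
            rcases this with h1 | h1
            · exact h1
            · exact absurd (List.mem_singleton.mp h1) hk)]

lemma pvStepA_char (P : List (List Int)) :
    ((P.foldl pvStepA (PySem.Dict.empty, PySem.Dict.empty, 0)).1.keys = pvKeys P) ∧
    ((P.foldl pvStepA (PySem.Dict.empty, PySem.Dict.empty, 0)).2.2 = ((pvKeys P).length : Int)) ∧
    (∀ k, (P.foldl pvStepA (PySem.Dict.empty, PySem.Dict.empty, 0)).1.get? k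
        = if k ∈ pvKeys P then some (pvGrpOf P k) else none) ∧
    (∀ k, (P.foldl pvStepA (PySem.Dict.empty, PySem.Dict.empty, 0)).2.1.get? k
        = if k ∈ pvKeys P then some ((((pvKeys P).idxOf k : Nat)) : Int) else none) := by
  induction P using List.reverseRecOn with
  | nil =>
      refine ⟨rfl, rfl, ?_, ?_⟩ <;> intro k <;> simp [pvKeys, PySem.Dict.get?_empty]
  | append_singleton P t ih =>
      obtain ⟨hkeys, hlen, hg, ho⟩ := ih
      simp only [List.foldl_append, List.foldl_cons, List.foldl_nil]
      exact pvStepA_step _ _ _ P t hkeys hlen hg ho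

-- ===== B side =====
lemma pvInvB_insert (c : pvTrie) (D : List (List Int)) (p : List Int) (a : Int)
    (hInv : pvInvB c D) (hNd : (pvRho D).Nodup)
    (hcl : ∀ t ∈ D, t ≠ [] ∧ t.dropLast ∈ pvRho D)
    (hp : p ∈ pvRho D) (hq : p ++ [a] ∉ pvRho D) :
    pvInvB (c.insert ((((pvRho D).idxOf p : Nat) : Int), a) (((pvRho D).length : Int)))
      (D ++ [p ++ [a]]) := by
  intro i b
  have hplt : (pvRho D).idxOf p < (pvRho D).length := List.idxOf_lt_length_of_mem hp
  rw [PySem.Dict.get?_insert]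
  by_cases hkey : ((i, b) : Int × Int) = (((((pvRho D).idxOf p : Nat)) : Int), a)
  · rw [if_pos hkey]
    have hi : i = (((pvRho D).idxOf p : Nat) : Int) := by
      have := congrArg Prod.fst hkey
      simpa using this
    have hb : b = a := by
      have := congrArg Prod.snd hkey
      simpa using this
    subst hi
    subst hb
    rw [if_pos (Int.natCast_nonneg _)]
    simp only [Int.toNat_natCast]
    rw [pvRho_append, List.getElem?_append_left hplt, List.getElem?_eq_getElem hplt,
      List.getElem_idxOf hplt]
    simp only []
    rw [if_pos (List.mem_append_right _ (List.mem_singleton_self _))]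
    rw [List.idxOf_append_of_notMem hq, List.idxOf_cons_self]
    simp
  · rw [if_neg hkey, hInv i b]
    by_cases h0 : 0 ≤ i
    · rw [if_pos h0, if_pos h0]
      by_cases hlt : i.toNat < (pvRho D).length
      · rw [pvRho_append, List.getElem?_append_left hlt, List.getElem?_eq_getElem hlt]
        simp only []
        by_cases hm : ((pvRho D)[i.toNat]'hlt ++ [b]) ∈ pvRho D
        · rw [if_pos hm, if_pos (List.mem_append_left _ hm), List.idxOf_append_of_mem hm]
        · rw [if_neg hm]
          have hm' : ((pvRho D)[i.toNat]'hlt ++ [b]) ∉ pvRho D ++ [p ++ [a]] := by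
            intro hmem
            rcases List.mem_append.mp hmem with h | h
            · exact hm h
            · have heq := List.mem_singleton.mp h
              have hub : (pvRho D)[i.toNat]'hlt = p := by
                have := congrArg List.dropLast heq
                simpa using this
              have hba : b = a := by
                have := congrArg (fun l => List.getLastD l 0) heq
                simpa using this
              apply hkey
              have hnat : i.toNat = (pvRho D).idxOf p := by
                rw [← hub]
                exact (List.Nodup.idxOf_getElem hNd _ hlt).symm
              have hii : i = (((pvRho D).idxOf p : Nat) : Int) := by
                rw [← hnat]
                exact (Int.toNat_of_nonneg h0).symm
              rw [hii, hba]
          rw [if_neg hm']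
      · have hnoneL : (pvRho D)[i.toNat]? = none := by
          rw [List.getElem?_eq_none_iff]
          omega
        rw [pvRho_append, hnoneL]
        rcases Nat.lt_trichotomy i.toNat (pvRho D).length with h | h | h
        · omega
        · have hsc : (pvRho D ++ [p ++ [a]])[i.toNat]? = some (p ++ [a]) := by
            rw [h]
            exact List.getElem?_concat_length
          rw [hsc]
          simp only []
          rw [if_neg ?_]
          intro hmem
          rcases List.mem_append.mp hmem with hmm | hmm
          · have hmm' : (p ++ [a]) ++ [b] = ([] : List Int) ∨ (p ++ [a]) ++ [b] ∈ D := by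
              simpa [pvRho] using hmm
            rcases hmm' with hc | hD
            · exact absurd hc (by simp)
            · have := (hcl _ hD).2
              rw [List.dropLast_concat] at this
              exact hq this
          · have heq := List.mem_singleton.mp hmm
            have hlen2 := congrArg List.length heq
            simp at hlen2
        · have hsc : (pvRho D ++ [p ++ [a]])[i.toNat]? = none := by
            rw [List.getElem?_eq_none_iff]
            simp only [List.length_append, List.length_singleton]
            omega
          rw [hsc]
    · rw [if_neg h0, if_neg h0]

lemma uwB_inner_spec (rest : List Int) :
    ∀ (p : List Int) (c : pvTrie) (cnt : pvCnt) (nid : Int) (D : List (List Int)),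
    pvStB c cnt nid D → p ∈ pvRho D →
    pvStB ((PySem.List.enumerate rest ((p.length : Int) + 1)).foldl uwB_inner
              (c, cnt, nid, (((pvRho D).idxOf p : Nat) : Int))).1
          ((PySem.List.enumerate rest ((p.length : Int) + 1)).foldl uwB_inner
              (c, cnt, nid, (((pvRho D).idxOf p : Nat) : Int))).2.1
          ((PySem.List.enumerate rest ((p.length : Int) + 1)).foldl uwB_inner
              (c, cnt, nid, (((pvRho D).idxOf p : Nat) : Int))).2.2.1
          (PySem.Set.update D ((pvPrefs rest).map (p ++ ·))) ∧
    (p ++ rest) ∈ pvRho (PySem.Set.update D ((pvPrefs rest).map (p ++ ·))) ∧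
    ((PySem.List.enumerate rest ((p.length : Int) + 1)).foldl uwB_inner
        (c, cnt, nid, (((pvRho D).idxOf p : Nat) : Int))).2.2.2
      = (((pvRho (PySem.Set.update D ((pvPrefs rest).map (p ++ ·)))).idxOf (p ++ rest) : Nat) : Int) := by
  induction rest with
  | nil =>
      intro p c cnt nid D hst hp
      simp only [PySem.List.enumerate_nil, List.foldl_nil, pvPrefs, List.length_nil,
        List.range_zero, List.map_nil, PySem.Set.update_nil, List.append_nil]
      exact ⟨hst, hp, by trivial⟩
  | cons a rest ih =>
      intro p c cnt nid D hst hp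
      obtain ⟨hNd, hcl, hnid, hcnt, hInv⟩ := hst
      have hplt : (pvRho D).idxOf p < (pvRho D).length := List.idxOf_lt_length_of_mem hp
      have hlook : c.get? (((((pvRho D).idxOf p : Nat)) : Int), a)
          = (if (p ++ [a]) ∈ pvRho D
             then some ((((pvRho D).idxOf (p ++ [a]) : Nat)) : Int) else none) := by
        rw [hInv, if_pos (Int.natCast_nonneg _)]
        simp only [Int.toNat_natCast]
        rw [List.getElem?_eq_getElem hplt, List.getElem_idxOf hplt]
      rw [PySem.List.enumerate_cons, List.foldl_cons]
      have hidx : ((p.length : Int) + 1) + 1 = (((p ++ [a]).length : Int) + 1) := by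
        have h : (p ++ [a]).length = p.length + 1 := by simp
        rw [h]
        push_cast
        ring
      have hnews : (pvPrefs (a :: rest)).map (fun x => p ++ x)
          = (p ++ [a]) :: (pvPrefs rest).map (fun x => (p ++ [a]) ++ x) := by
        rw [pvPrefs_cons]
        simp [List.map_map, Function.comp_def]
      have happ : p ++ a :: rest = (p ++ [a]) ++ rest := by simp
      by_cases hq : (p ++ [a]) ∈ pvRho D
      · have hstep : uwB_inner (c, cnt, nid, ((((pvRho D).idxOf p : Nat)) : Int))
            (((p.length : Int) + 1, a) : Int × Int)
            = (c, cnt, nid, ((((pvRho D).idxOf (p ++ [a]) : Nat)) : Int)) := by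
          simp only [uwB_inner]
          rw [hlook, if_pos hq]
        have hqD : (p ++ [a]) ∈ D := by
          have : (p ++ [a]) = ([] : List Int) ∨ (p ++ [a]) ∈ D := by simpa [pvRho] using hq
          rcases this with h | h
          · exact absurd h (by simp)
          · exact h
        rw [hstep, hidx, hnews, happ, PySem.Set.update_cons, PySem.Set.add_of_mem hqD]
        exact ih (p ++ [a]) c cnt nid D ⟨hNd, hcl, hnid, hcnt, hInv⟩ hq
      · have hqD : (p ++ [a]) ∉ D := fun h => hq (by simp [pvRho, h])
        have hstep : uwB_inner (c, cnt, nid, ((((pvRho D).idxOf p : Nat)) : Int))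
            (((p.length : Int) + 1, a) : Int × Int)
            = (c.insert (((((pvRho D).idxOf p : Nat)) : Int), a) nid,
               cnt.modify (a, (p.length : Int) + 1) 0 (· + 1), nid + 1, nid) := by
          simp only [uwB_inner]
          rw [hlook, if_neg hq]
        rw [hstep, hidx, hnews, happ, PySem.Set.update_cons, PySem.Set.add_of_not_mem hqD]
        have hNd2 : (pvRho (D ++ [p ++ [a]])).Nodup := by
          rw [pvRho_append]
          exact List.Nodup.append hNd (List.nodup_singleton _) (by simp [hq])
        have hcl2 : ∀ t ∈ D ++ [p ++ [a]], t ≠ [] ∧ t.dropLast ∈ pvRho (D ++ [p ++ [a]]) := by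
          intro t ht
          rw [pvRho_append]
          rcases List.mem_append.mp ht with h | h
          · exact ⟨(hcl t h).1, List.mem_append_left _ (hcl t h).2⟩
          · rw [List.mem_singleton.mp h]
            exact ⟨by simp, by rw [List.dropLast_concat]; exact List.mem_append_left _ hp⟩
        have hnid2 : nid + 1 = ((pvRho (D ++ [p ++ [a]])).length : Int) := by
          rw [pvRho_append, List.length_append, List.length_singleton, hnid]
          push_cast
          ring
        have hcnt2 : cnt.modify (a, (p.length : Int) + 1) 0 (· + 1)
            = PySem.Dict.counter ((D ++ [p ++ [a]]).map pvSig) := by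
          rw [List.map_append, List.map_singleton, PySem.Dict.counter_append_singleton,
            ← hcnt, pvSig_concat]
        have hInv2 : pvInvB (c.insert (((((pvRho D).idxOf p : Nat)) : Int), a) nid)
            (D ++ [p ++ [a]]) := by
          rw [hnid]
          exact pvInvB_insert c D p a hInv hNd hcl hp hq
        have hmem2 : (p ++ [a]) ∈ pvRho (D ++ [p ++ [a]]) := by
          rw [pvRho_append]
          exact List.mem_append_right _ (List.mem_singleton_self _)
        have hcur : nid = ((((pvRho (D ++ [p ++ [a]])).idxOf (p ++ [a]) : Nat)) : Int) := by
          rw [pvRho_append, List.idxOf_append_of_notMem hq, List.idxOf_cons_self, hnid]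
          push_cast
          ring
        have hres := ih (p ++ [a]) _ _ _ (D ++ [p ++ [a]])
          ⟨hNd2, hcl2, hnid2, hcnt2, hInv2⟩ hmem2
        rw [← hcur] at hres
        exact hres

lemma uwB_outer_spec (seqs : List (List Int)) :
    ∀ (c : pvTrie) (cnt : pvCnt) (nid : Int) (D : List (List Int)),
    pvStB c cnt nid D →
    pvStB (seqs.foldl
            (fun st seq =>
              let r := (PySem.List.enumerate seq 1).foldl uwB_inner (st.1, st.2.1, st.2.2, 0)
              (r.1, r.2.1, r.2.2.1)) (c, cnt, nid)).1
          (seqs.foldl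
            (fun st seq =>
              let r := (PySem.List.enumerate seq 1).foldl uwB_inner (st.1, st.2.1, st.2.2, 0)
              (r.1, r.2.1, r.2.2.1)) (c, cnt, nid)).2.1
          (seqs.foldl
            (fun st seq =>
              let r := (PySem.List.enumerate seq 1).foldl uwB_inner (st.1, st.2.1, st.2.2, 0)
              (r.1, r.2.1, r.2.2.1)) (c, cnt, nid)).2.2
          (seqs.foldl (fun D s => PySem.Set.update D (pvPrefs s)) D) := by
  induction seqs with
  | nil => intro c cnt nid D hst; simpa using hst
  | cons s ss ih =>
      intro c cnt nid D hst
      simp only [List.foldl_cons]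
      have h := uwB_inner_spec s [] c cnt nid D hst (by simp [pvRho])
      have hzero : ((((pvRho D).idxOf ([] : List Int) : Nat)) : Int) = 0 := by
        have h1 : (pvRho D).idxOf ([] : List Int) = 0 := List.idxOf_cons_self
        rw [h1]
        rfl
      have hone : ((([] : List Int).length : Int) + 1) = 1 := by simp
      have hmapid : (pvPrefs s).map (fun x => [] ++ x) = pvPrefs s := by simp
      rw [hzero, hone, hmapid] at h
      obtain ⟨hst', _, _⟩ := h
      exact ih _ _ _ _ hst'

lemma pvStB_init : pvStB PySem.Dict.empty PySem.Dict.empty 1 [] := by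
  refine ⟨by simp [pvRho], by simp, by simp [pvRho], rfl, ?_⟩
  intro i a
  rw [PySem.Dict.get?_empty]
  by_cases h : 0 ≤ i
  · rw [if_pos h]
    rcases hn : i.toNat with _ | n <;> simp [pvRho]
  · rw [if_neg h]

lemma pvDFold (seqs : List (List Int)) :
    seqs.foldl (fun D s => PySem.Set.update D (pvPrefs s)) []
      = PySem.Set.ofList (pvAllP seqs) := by
  have aux : ∀ (ss : List (List Int)) (D : List (List Int)),
      ss.foldl (fun D s => PySem.Set.update D (pvPrefs s)) D
        = PySem.Set.update D (pvAllP ss) := by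
    intro ss
    induction ss with
    | nil => intro D; rfl
    | cons s ss ih =>
        intro D
        simp only [List.foldl_cons, ih, pvAllP, List.flatMap_cons]
        rw [PySem.Set.update_append]
  rw [aux, PySem.Set.update_nil_left]

-- ===== counting glue =====
lemma pvOfList_map_ofList {α β : Type} [BEq α] [LawfulBEq α] [BEq β] [LawfulBEq β]
    (f : α → β) (xs : List α) :
    PySem.Set.ofList ((PySem.Set.ofList xs).map f) = PySem.Set.ofList (xs.map f) := by
  induction xs using List.reverseRecOn with
  | nil => rfl
  | append_singleton xs x ih =>
      rw [PySem.Set.ofList_append_singleton, List.map_append, List.map_singleton,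
        PySem.Set.ofList_append_singleton, ← ih]
      by_cases hx : x ∈ PySem.Set.ofList xs
      · rw [PySem.Set.add_of_mem hx, PySem.Set.add_of_mem ?_]
        rw [PySem.Set.mem_ofList]
        exact List.mem_map_of_mem hx
      · rw [PySem.Set.add_of_not_mem hx, List.map_append, List.map_singleton,
          PySem.Set.ofList_append_singleton]

lemma pvOfList_filter {α : Type} [BEq α] [LawfulBEq α] (p : α → Bool) (xs : List α) :
    PySem.Set.ofList (xs.filter p) = (PySem.Set.ofList xs).filter p := by
  induction xs using List.reverseRecOn with
  | nil => rfl
  | append_singleton xs x ih =>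
      rw [List.filter_append, PySem.Set.ofList_append_singleton]
      by_cases hp : p x
      · simp only [List.filter_cons, List.filter_nil, hp, if_pos]
        rw [PySem.Set.ofList_append_singleton, ih]
        by_cases hx : x ∈ PySem.Set.ofList xs
        · rw [PySem.Set.add_of_mem hx, PySem.Set.add_of_mem ?_]
          exact List.mem_filter.mpr ⟨hx, hp⟩
        · rw [PySem.Set.add_of_not_mem hx, PySem.Set.add_of_not_mem
            (fun hmem => hx (List.mem_filter.mp hmem).1), List.filter_append]
          simp [hp]
      · simp only [List.filter_cons, List.filter_nil, hp, if_neg, Bool.false_eq_true,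
          not_false_iff, List.append_nil]
        rw [ih]
        by_cases hx : x ∈ PySem.Set.ofList xs
        · rw [PySem.Set.add_of_mem hx]
        · rw [PySem.Set.add_of_not_mem hx, List.filter_append]
          simp [hp]

lemma pvAllP_ne_nil (seqs : List (List Int)) : ∀ t ∈ pvAllP seqs, t ≠ [] := by
  intro t ht
  simp only [pvAllP, List.mem_flatMap, pvPrefs, List.mem_map, List.mem_range] at ht
  obtain ⟨s, _, i, hi, rfl⟩ := ht
  have hlen : (s.take (i+1)).length = i+1 := by rw [List.length_take]; omega
  intro hnil
  rw [hnil] at hlen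
  simp at hlen

lemma pvCount_eq (P : List (List Int)) (hne : ∀ t ∈ P, t ≠ []) (k : Int × Int) :
    ((pvGrpOf P k).length : Int)
      = (((PySem.Set.ofList P).map pvSig).count k : Int) := by
  have hrec : ∀ (t : List Int), t ≠ [] → t.dropLast ++ [t.getLastD 0] = t := by
    intro t
    induction t using List.reverseRecOn with
    | nil => intro h; exact absurd rfl h
    | append_singleton u b _ =>
        intro _
        rw [List.dropLast_concat, List.getLastD_concat]
  have hnodup : ((((PySem.Set.ofList P).filter (fun t => pvSig t == k)).map
      (·.dropLast)).Nodup) := by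
    refine List.Nodup.map_on ?_ (List.Nodup.filter _ (PySem.Set.nodup_ofList P))
    intro x hx y hy hxy
    obtain ⟨hxP, hqx⟩ := List.mem_filter.mp hx
    obtain ⟨hyP, hqy⟩ := List.mem_filter.mp hy
    have hx0 : pvSig x = k := by simpa using hqx
    have hy0 : pvSig y = k := by simpa using hqy
    have hxne : x ≠ [] := hne x (by rwa [PySem.Set.mem_ofList] at hxP)
    have hyne : y ≠ [] := hne y (by rwa [PySem.Set.mem_ofList] at hyP)
    have hx1 : x.dropLast ++ [k.1] = x := by
      have := hrec x hxne
      rw [show x.getLastD 0 = k.1 from congrArg Prod.fst hx0] at this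
      exact this
    have hy1 : y.dropLast ++ [k.1] = y := by
      have := hrec y hyne
      rw [show y.getLastD 0 = k.1 from congrArg Prod.fst hy0] at this
      exact this
    rw [← hx1, ← hy1, hxy]
  have h1 : pvGrpOf P k
      = ((PySem.Set.ofList P).filter (fun t => pvSig t == k)).map (·.dropLast) := by
    unfold pvGrpOf
    rw [← pvOfList_map_ofList (fun t : List Int => t.dropLast)
        (P.filter (fun t => pvSig t == k)), pvOfList_filter]
    exact PySem.Set.ofList_eq_self_of_nodup _ hnodup
  rw [h1, List.length_map]
  have h2 : ((PySem.Set.ofList P).map pvSig).count k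
      = List.countP (fun t => pvSig t == k) (PySem.Set.ofList P) := by
    rw [List.count_eq_countP, List.countP_map]
    rfl
  rw [h2, List.countP_eq_length_filter]

-- ===== sorting glue =====
lemma pvInsertBy_congr {α : Type} (b1 b2 : α → α → Bool) (x : α) (ys : List α)
    (h : ∀ y ∈ ys, b1 x y = b2 x y) :
    PySem.List.insertBy b1 x ys = PySem.List.insertBy b2 x ys := by
  induction ys with
  | nil => rfl
  | cons y ys ih =>
      simp only [PySem.List.insertBy]
      rw [h y (by simp)]
      split
      · rfl
      · rw [ih (fun z hz => h z (by simp [hz]))]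

lemma pvSorted2_eq_sorted (xs : List (Int × Int)) (k2 : Int × Int → Int)
    (h : xs.Pairwise (fun a b => k2 a < k2 b)) :
    PySem.List.sorted2 xs (fun k => k.2) k2 = PySem.List.sorted xs (fun k => k.2) := by
  have aux : ∀ (ys acc : List (Int × Int)),
      ys.Pairwise (fun a b => k2 a < k2 b) →
      (∀ y ∈ acc, ∀ x ∈ ys, k2 y < k2 x) →
      ys.foldl (fun acc x => PySem.List.insertBy
          (fun a b => decide (a.2 < b.2) || (!decide (b.2 < a.2) && decide (k2 a < k2 b))) x acc) acc
        = ys.foldl (fun acc x => PySem.List.insertBy (fun a b => decide (a.2 < b.2)) x acc) acc := by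
    intro ys
    induction ys with
    | nil => intros; rfl
    | cons x ys ih =>
        intro acc hp hacc
        simp only [List.foldl_cons]
        rw [pvInsertBy_congr
          (fun a b => decide (a.2 < b.2) || (!decide (b.2 < a.2) && decide (k2 a < k2 b)))
          (fun a b => decide (a.2 < b.2)) x acc ?_]
        · exact ih (PySem.List.insertBy _ x acc) (List.pairwise_cons.mp hp).2
            (fun y hy x' hx' => by
              rcases (PySem.List.mem_insertBy _ x y acc).mp hy with h | h
              · subst h; exact (List.pairwise_cons.mp hp).1 x' hx'
              · exact hacc y h x' (List.mem_cons_of_mem _ hx'))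
        · intro y hy
          have hlt : k2 y < k2 x := hacc y hy x (List.mem_cons_self ..)
          have hnl : ¬ (k2 x < k2 y) := not_lt_of_gt hlt
          show (decide (x.2 < y.2) || (!decide (y.2 < x.2) && decide (k2 x < k2 y)))
              = decide (x.2 < y.2)
          simp [hnl]
  unfold PySem.List.sorted2 PySem.List.sorted
  simp only [Bool.false_eq_true, if_false]
  exact aux xs [] h (by simp)

-- ===== VERDICT (by name: the statement is the Claim_ definition above) =====
theorem unwind_sequences_spec : Claim_equal_unwind_sequences := by
  intro seqs _hdom
  show unwind_sequences seqs = unwind_sequences_alt seqs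
  obtain ⟨hkeysA, hlenA, hgA, hoA⟩ := pvStepA_char (pvAllP seqs)
  have hB := uwB_outer_spec seqs PySem.Dict.empty PySem.Dict.empty 1 [] pvStB_init
  rw [pvDFold seqs] at hB
  obtain ⟨hNdB, hclB, hnidB, hcntB, hInvB⟩ := hB
  have hKB : PySem.Set.ofList ((PySem.Set.ofList (pvAllP seqs)).map pvSig)
      = pvKeys (pvAllP seqs) := by
    rw [pvOfList_map_ofList]
    rfl
  have hKnodup : (pvKeys (pvAllP seqs)).Nodup := PySem.Set.nodup_ofList _
  simp only [unwind_sequences, unwind_sequences_alt]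
  rw [uwA_outer_spec, hkeysA, hcntB, PySem.Dict.keys_counter, hKB]
  have hPW : (pvKeys (pvAllP seqs)).Pairwise
      (fun x y =>
        ((pvAllP seqs).foldl pvStepA (PySem.Dict.empty, PySem.Dict.empty, 0)).2.1.getD x 0
          < ((pvAllP seqs).foldl pvStepA (PySem.Dict.empty, PySem.Dict.empty, 0)).2.1.getD y 0) := by
    rw [List.pairwise_iff_getElem]
    intro i j hi hj hij
    have e1 : ((pvAllP seqs).foldl pvStepA (PySem.Dict.empty, PySem.Dict.empty, 0)).2.1.getD
        ((pvKeys (pvAllP seqs))[i]) 0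
        = ((((pvKeys (pvAllP seqs)).idxOf ((pvKeys (pvAllP seqs))[i]) : Nat)) : Int) := by
      have h0 := hoA ((pvKeys (pvAllP seqs))[i])
      rw [if_pos (List.getElem_mem hi)] at h0
      exact PySem.Dict.getD_of_get?_eq_some _ _ h0
    have e2 : ((pvAllP seqs).foldl pvStepA (PySem.Dict.empty, PySem.Dict.empty, 0)).2.1.getD
        ((pvKeys (pvAllP seqs))[j]) 0
        = ((((pvKeys (pvAllP seqs)).idxOf ((pvKeys (pvAllP seqs))[j]) : Nat)) : Int) := by
      have h0 := hoA ((pvKeys (pvAllP seqs))[j])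
      rw [if_pos (List.getElem_mem hj)] at h0
      exact PySem.Dict.getD_of_get?_eq_some _ _ h0
    rw [e1, e2, List.Nodup.idxOf_getElem hKnodup i hi, List.Nodup.idxOf_getElem hKnodup j hj]
    exact_mod_cast hij
  rw [pvSorted2_eq_sorted _ _ hPW]
  simp only [PySem.Dict.getD_counter]
  rw [PySem.List.foldl_prod_mk
      (fun (s : List Int) (e : Int × Int) =>
        s ++ [e.1 * (((pvAllP seqs).foldl pvStepA
            (PySem.Dict.empty, PySem.Dict.empty, 0)).1.getD e PySem.Set.empty).len])
      (fun (s : List (List Int)) (e : Int × Int) =>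
        s ++ [PySem.List.pyRepeat [e.2] (((pvAllP seqs).foldl pvStepA
            (PySem.Dict.empty, PySem.Dict.empty, 0)).1.getD e PySem.Set.empty).len])
      (PySem.List.sorted (pvKeys (pvAllP seqs)) (fun k => k.2)) [] []]
  simp only [PySem.List.foldl_append_singleton_eq_map, List.nil_append]
  have hcountEq : ∀ k ∈ pvKeys (pvAllP seqs),
      PySem.Set.len (((pvAllP seqs).foldl pvStepA
          (PySem.Dict.empty, PySem.Dict.empty, 0)).1.getD k PySem.Set.empty)
        = ((((PySem.Set.ofList (pvAllP seqs)).map pvSig).count k : Nat) : Int) := by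
    intro k hk
    have e : ((pvAllP seqs).foldl pvStepA
        (PySem.Dict.empty, PySem.Dict.empty, 0)).1.getD k PySem.Set.empty
        = pvGrpOf (pvAllP seqs) k := by
      have h0 := hgA k
      rw [if_pos hk] at h0
      exact PySem.Dict.getD_of_get?_eq_some _ _ h0
    rw [e]
    show ((pvGrpOf (pvAllP seqs) k).length : Int) = _
    exact pvCount_eq (pvAllP seqs) (pvAllP_ne_nil seqs) k
  refine Prod.ext ?_ ?_
  · apply List.map_congr_left
    intro k hk
    have hk' : k ∈ pvKeys (pvAllP seqs) := (PySem.List.mem_sorted _ _ _ _).mp hk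
    rw [hcountEq k hk']
  · apply List.map_congr_left
    intro k hk
    have hk' : k ∈ pvKeys (pvAllP seqs) := (PySem.List.mem_sorted _ _ _ _).mp hk
    rw [hcountEq k hk']
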